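-- pv_equiv track=rewrite | github.com/HAOYUANJIE123/potentialTenant_SeekingProj-MLP- | FeatureConstructModel/tenantFeatureConstruct.py | growthRateCacultion_F
-- ===== SOURCE A (Python) =====
-- from collections import Counter
--
-- def growthRateCacultion_F(in_set=[]):
--     '''
--     :param in_set: [{'id':'','year':''},...]
--     :return:growthrate,num
--     '''
--     num=len(in_set)
--     years=[i['year'] for i in in_set]
--     c=Counter(years).most_common()
--     growthrate=0
--     if len(c)>1:
--         sort_c=sorted(c,key = lambda c : c[0], reverse = True)
--         growthrate =((sort_c[0][1])-(sort_c[1][1]))//(sort_c[1][1])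
--
--     return growthrate,num
-- ===== SOURCE B (Python) =====
-- def growthRateCacultion_F(in_set=[]):
--     num = len(in_set)
--     counts = {}
--     for i in in_set:
--         y = i['year']
--         counts[y] = counts.get(y, 0) + 1
--     growthrate = 0
--     if len(counts) > 1:
--         y1 = max(counts)
--         y2 = max(k for k in counts if k != y1)
--         growthrate = (counts[y1] - counts[y2]) // counts[y2]
--     return growthrate, num
-- ===== Notes on version B (the rewrite author's own statement) =====
-- stated objective: simpler
-- what changed: B counts years into a plain dict in one pass and selects the top two years by two max-scans, replacing Counter.most_common() followed by a full sort of the (year,count) pairs.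
import Mathlib
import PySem

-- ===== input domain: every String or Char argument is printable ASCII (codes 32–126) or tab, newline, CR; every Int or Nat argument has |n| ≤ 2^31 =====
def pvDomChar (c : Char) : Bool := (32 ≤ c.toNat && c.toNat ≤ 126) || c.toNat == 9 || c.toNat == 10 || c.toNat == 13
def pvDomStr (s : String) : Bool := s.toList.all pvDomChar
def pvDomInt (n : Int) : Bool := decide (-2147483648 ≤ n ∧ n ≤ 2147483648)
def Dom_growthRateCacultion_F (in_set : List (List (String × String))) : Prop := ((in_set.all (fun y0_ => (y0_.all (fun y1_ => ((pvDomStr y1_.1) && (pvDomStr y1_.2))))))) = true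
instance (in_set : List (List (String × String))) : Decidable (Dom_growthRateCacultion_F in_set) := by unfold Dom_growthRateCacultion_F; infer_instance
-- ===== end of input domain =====

-- B replaces Counter.most_common() + a full sort of the (year,count) pairs by a one-pass
-- dict count and two max-selection scans over the distinct years; objective: simpler.


-- ===== PORT A =====
-- i['year'] on an association-list dict: first matching pair; the default "" is never
-- reached under Pre_ (the dict contains the key), where Python would raise KeyError.
def pvAssocGetD (d : List (String × String)) (k : String) (dflt : String) : String :=
  ((d.find? (fun p => p.1 == k)).map (·.2)).getD dflt

def growthRateCacultion_F (in_set : List (List (String × String))) : Int × Int :=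
  let num : Int := in_set.length
  let years : List String := in_set.map (fun i => pvAssocGetD i "year" "")
  -- Counter(years).most_common() = sorted(counter.items(), key=value, reverse=True) (CPython)
  let c : List (String × Int) := PySem.List.sorted (PySem.Dict.counter years).items (fun p => p.2) true
  if 1 < c.length then
    let sort_c := PySem.List.sorted c (fun p => p.1) true
    (PySem.Int.floordiv ((PySem.List.pyGetD sort_c 0 ("", 0)).2 - (PySem.List.pyGetD sort_c 1 ("", 0)).2)
      ((PySem.List.pyGetD sort_c 1 ("", 0)).2), num)
  else (0, num)

-- ===== PORT B =====
def growthRateCacultion_F_alt (in_set : List (List (String × String))) : Int × Int :=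
  let num : Int := in_set.length
  let counts : PySem.Dict String Int := in_set.foldl
    (fun d i =>
      let y := pvAssocGetD i "year" ""
      d.insert y (d.getD y 0 + 1)) PySem.Dict.empty
  if 1 < counts.size then
    match PySem.List.max? counts.keys (fun k => k) with
    | some y1 =>
      match PySem.List.max? (counts.keys.filter (fun k => !(k == y1))) (fun k => k) with
      | some y2 =>
        (PySem.Int.floordiv (counts.getD y1 0 - counts.getD y2 0) (counts.getD y2 0), num)
      | none => (0, num)   -- unreachable: ≥ 2 distinct keys
    | none => (0, num)     -- unreachable: ≥ 2 distinct keys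
  else (0, num)

-- ===== PRECONDITION & SPEC =====
-- Pre_: every record contains the key 'year'; otherwise Python's i['year'] raises KeyError.
def Pre_growthRateCacultion_F (in_set : List (List (String × String))) : Prop :=
  (in_set.all (fun d => d.any (fun p => p.1 == "year"))) = true
instance (in_set : List (List (String × String))) : Decidable (Pre_growthRateCacultion_F in_set) := by
  unfold Pre_growthRateCacultion_F; infer_instance

def pvWitness_growthRateCacultion_F : (List (List (String × String))) :=
  [[("id", "1"), ("year", "2019")], [("id", "2"), ("year", "2020")], [("id", "3"), ("year", "2020")]]

def Spec_growthRateCacultion_F (in_set : List (List (String × String))) (out : Int × Int) : Prop :=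
  out = growthRateCacultion_F_alt in_set
instance (in_set : List (List (String × String))) (out : Int × Int) : Decidable (Spec_growthRateCacultion_F in_set out) := by
  unfold Spec_growthRateCacultion_F; infer_instance

-- ===== CLAIM (what is proved, stated in full; the proofs are below) =====
def Claim_equal_growthRateCacultion_F : Prop := ∀ (in_set : List (List (String × String))), Dom_growthRateCacultion_F in_set → Pre_growthRateCacultion_F in_set → Spec_growthRateCacultion_F in_set (growthRateCacultion_F in_set)

-- ===== LEMMAS AND PROOFS =====

-- The A-side double sort of Counter items by count then by year (reverse) is the list of
-- (year, count) pairs over the distinct years in strictly decreasing year order.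
lemma sorted_mostcommon_eq (ys : List String) :
    PySem.List.sorted (PySem.List.sorted (PySem.Dict.counter ys).items (fun p => p.2) true) (fun p => p.1) true
      = (PySem.List.sorted (PySem.Set.ofList ys) (fun k => k) true).map
          (fun k => (k, (List.count k ys : Int))) := by
  refine PySem.List.sorted_rev_eq_of_perm_of_pairwise_gt _ _ _ ?_ ?_
  · have h1 : ((PySem.List.sorted (PySem.Set.ofList ys) (fun k => k) true).map
        (fun k => (k, (List.count k ys : Int)))).Perm
        ((PySem.Set.ofList ys).map (fun k => (k, (List.count k ys : Int)))) :=
      (PySem.List.sorted_perm _ _ _).map _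
    rw [← PySem.Dict.items_counter ys] at h1
    exact h1.trans (PySem.List.sorted_perm _ _ _).symm
  · rw [List.pairwise_map]
    have hnd : (PySem.List.sorted (PySem.Set.ofList ys) (fun k => k) true).Nodup :=
      ((PySem.List.sorted_perm _ _ _).nodup_iff).mpr (PySem.Set.nodup_ofList ys)
    have hle := PySem.List.sorted_pairwise_rev (PySem.Set.ofList ys) (fun k => k)
    refine (hle.and hnd).imp ?_
    rintro x y ⟨h1, h2⟩
    exact lt_of_le_of_ne h1 (Ne.symm h2)

-- max selection on a nodup list equals the head of the reverse sort.
lemma max?_eq_head_sorted_rev (K : List String) (a : String) (t : List String)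
    (hs : PySem.List.sorted K (fun k => k) true = a :: t) :
    PySem.List.max? K (fun k => k) = some a := by
  have hKne : K ≠ [] := by
    intro h; rw [h] at hs; simp [PySem.List.sorted] at hs
  obtain ⟨m, hm⟩ : ∃ m, PySem.List.max? K (fun k => k) = some m := by
    cases h : PySem.List.max? K (fun k => k) with
    | none => exact absurd ((PySem.List.max?_eq_none_iff K _).mp h) hKne
    | some m => exact ⟨m, rfl⟩
  have haK : a ∈ K := (PySem.List.sorted_perm K _ true).subset (by rw [hs]; simp)
  have h1 : a ≤ m := PySem.List.max?_isMax hm a haK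
  have h2 : m ≤ a := PySem.List.key_head_sorted_rev_ge K _ hs m (PySem.List.max?_mem hm)
  rw [hm, le_antisymm h2 h1]

theorem growthRateCacultion_F_spec : Claim_equal_growthRateCacultion_F := by
  intro in_set _ _
  unfold Spec_growthRateCacultion_F growthRateCacultion_F growthRateCacultion_F_alt
  simp only []
  set ys : List String := in_set.map (fun i => pvAssocGetD i "year" "") with hys
  -- B's counting loop builds Counter(years)
  have hcounts : in_set.foldl
      (fun d i =>
        let y := pvAssocGetD i "year" ""
        d.insert y (d.getD y 0 + 1)) PySem.Dict.empty = PySem.Dict.counter ys := by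
    rw [← PySem.Dict.foldl_insert_getD_add_one_eq_counter ys, hys, List.foldl_map]
  rw [hcounts]
  -- both guards are 1 < number of distinct years
  have hlenc : (PySem.List.sorted (PySem.Dict.counter ys).items (fun p => p.2) true).length
      = (PySem.Set.ofList ys).length := by
    rw [PySem.List.length_sorted, PySem.Dict.items_counter, List.length_map]
  have hsize : (PySem.Dict.counter ys).size = (PySem.Set.ofList ys).length := by
    show (PySem.Dict.counter ys).items.length = _
    rw [PySem.Dict.items_counter, List.length_map]
  by_cases hg : 1 < (PySem.Set.ofList ys).length
  · rw [if_pos (by rw [hlenc]; exact hg), if_pos (by rw [hsize]; exact hg)]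
    -- the sorted distinct years have at least two elements
    obtain ⟨a, b, t, hs⟩ : ∃ a b t,
        PySem.List.sorted (PySem.Set.ofList ys) (fun k => k) true = a :: b :: t := by
      have : 1 < (PySem.List.sorted (PySem.Set.ofList ys) (fun k => k) true).length := by
        rw [PySem.List.length_sorted]; exact hg
      match h : PySem.List.sorted (PySem.Set.ofList ys) (fun k => k) true with
      | [] => rw [h] at this; simp at this
      | [x] => rw [h] at this; simp at this
      | a :: b :: t => exact ⟨a, b, t, rfl⟩
    have hnd : (a :: b :: t).Nodup := by
      rw [← hs]
      exact ((PySem.List.sorted_perm _ _ _).nodup_iff).mpr (PySem.Set.nodup_ofList ys)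
    have hpw : (a :: b :: t).Pairwise (fun x y => y ≤ x) := by
      rw [← hs]; exact PySem.List.sorted_pairwise_rev _ _
    -- A side: the doubly sorted list starts (a, count a) :: (b, count b) :: …
    have hA := sorted_mostcommon_eq ys
    rw [hs] at hA
    simp only [List.map_cons] at hA
    rw [hA]
    -- B side: y1 = a
    have hkeys : (PySem.Dict.counter ys).keys = PySem.Set.ofList ys := PySem.Dict.keys_counter ys
    rw [hkeys]
    rw [max?_eq_head_sorted_rev (PySem.Set.ofList ys) a (b :: t) hs]
    -- B side: y2 = b (max over the distinct years ≠ a)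
    have hbne : b ≠ a := by
      have h := (List.nodup_cons.mp hnd).1
      intro he; exact h (he ▸ List.mem_cons_self)
    have hy2 : PySem.List.max? ((PySem.Set.ofList ys).filter (fun k => !(k == a))) (fun k => k)
        = some b := by
      have hmemK : ∀ x, x ∈ PySem.Set.ofList ys ↔ x ∈ a :: b :: t := by
        intro x
        rw [← hs]
        exact ((PySem.List.sorted_perm _ _ _).mem_iff).symm
      have hbF : b ∈ (PySem.Set.ofList ys).filter (fun k => !(k == a)) := by
        rw [List.mem_filter]
        exact ⟨(hmemK b).mpr (by simp), by simp [hbne]⟩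
      obtain ⟨m, hm⟩ : ∃ m, PySem.List.max? ((PySem.Set.ofList ys).filter (fun k => !(k == a))) (fun k => k) = some m := by
        cases h : PySem.List.max? ((PySem.Set.ofList ys).filter (fun k => !(k == a))) (fun k => k) with
        | none =>
          rw [PySem.List.max?_eq_none_iff] at h
          rw [h] at hbF; simp at hbF
        | some m => exact ⟨m, rfl⟩
      have h1 : b ≤ m := PySem.List.max?_isMax hm b hbF
      have hmF := PySem.List.max?_mem hm
      rw [List.mem_filter] at hmF
      have hmK : m ∈ a :: b :: t := (hmemK m).mp hmF.1
      have hmna : m ≠ a := by simpa using hmF.2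
      have h2 : m ≤ b := by
        simp only [List.mem_cons] at hmK
        rcases hmK with h | h | h
        · exact absurd h hmna
        · exact le_of_eq h
        · exact (List.pairwise_cons.mp (List.pairwise_cons.mp hpw).2).1 m h
      rw [hm, le_antisymm h2 h1]
    -- both produce floordiv (count a - count b) (count b)
    simp [hy2, PySem.List.pyGetD_ofNat',
      PySem.Dict.getD_counter]
  · rw [if_neg (by rw [hlenc]; exact hg), if_neg (by rw [hsize]; exact hg)]
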